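-- pv_equiv track=rewrite | github.com/Pazbear/CodingTestStudy | 프로그래머스/LV2/메뉴_리뉴얼.py | solution
-- ===== SOURCE A (Python) =====
-- import itertools
--
-- def solution(orders, course):
--     answer = []
--     available_course = {}
--     for order in orders:
--         order = ''.join(sorted(order))
--         for i in course:
--             if i > len(order):
--                 continue
--
--             #가능한 콤비네이션을 모두 만든 후 그것이 중복될때마다 갯수 올림
--             for c in list(map(''.join, itertools.combinations(order, i))):
--                 if c in available_course:
--                     available_course[c]+=1
--                 else:
--                     available_course[c]=1
--
--     #코스개수 별로 가장 많은 코스를 도출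
--     for c in course:
--         maxn=0
--         maxarr=[]
--         for ac in available_course:
--             if len(ac)==c:
--                 if available_course[ac]==1:
--                     continue
--                 if maxn < available_course[ac]:
--                     maxn=available_course[ac]
--                     maxarr=[ac]
--                 elif maxn == available_course[ac]:
--                     maxarr.append(ac)
--         for ma in maxarr:
--             answer.append(ma)
--     return sorted(answer)
-- ===== SOURCE B (Python) =====
-- import itertools
-- from collections import Counter
--
-- def solution(orders, course):
--     answer = []
--     sorted_orders = [''.join(sorted(order)) for order in orders]
--     for c in course:
--         counter = Counter()
--         for s in sorted_orders:
--             if c <= len(s):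
--                 counter.update(map(''.join, itertools.combinations(s, c)))
--         if counter:
--             best = max(counter.values())
--             if best >= 2:
--                 answer += [k for k, v in counter.items() if v == best]
--     return sorted(answer)
-- ===== Notes on version B (the rewrite author's own statement) =====
-- stated objective: idiomatic
-- what changed: Replaces the single global combination-count dict (built order-outer/length-inner) plus a repeated scan of the whole dict for every course length with a per-length outer loop that builds a fresh collections.Counter per length and selects the keys achieving max(values) under a best >= 2 guard.
-- intended difference: When course contains some length c at least twice and every length-c combination generated from the orders is distinct, A's global dict counts each combination once per duplicate occurrence of c, so these single-occurrence combinations pass its count==1 filter and A returns them (repeated per occurrence of c); B's fresh per-length counter sees their true count 1 and returns the intended empty contribution for that length. — e.g. on solution(["ab"], [2, 2]): A returns ["ab", "ab"], B returns []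
import Mathlib
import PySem

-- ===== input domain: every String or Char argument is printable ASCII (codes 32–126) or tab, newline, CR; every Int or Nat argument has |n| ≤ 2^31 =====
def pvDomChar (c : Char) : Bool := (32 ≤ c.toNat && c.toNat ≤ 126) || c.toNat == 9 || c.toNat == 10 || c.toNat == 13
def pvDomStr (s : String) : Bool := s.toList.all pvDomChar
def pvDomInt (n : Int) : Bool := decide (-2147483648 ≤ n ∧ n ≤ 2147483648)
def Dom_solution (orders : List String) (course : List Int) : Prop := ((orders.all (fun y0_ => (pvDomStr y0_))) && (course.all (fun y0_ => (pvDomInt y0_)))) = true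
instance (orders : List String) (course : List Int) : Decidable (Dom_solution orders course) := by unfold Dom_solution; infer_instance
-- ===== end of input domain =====

-- B replaces A's global combination-count dict and its repeated full-dict scans by an
-- idiomatic per-course-length loop (fresh counter per length, per-bucket max); same cost.

-- ===== PORT A =====
-- ''.join(sorted(order)) iterated as chars
def sortedChars (o : String) : List Char := PySem.List.sorted o.toList (fun c => c) false

-- 'if c in available_course: available_course[c]+=1 else: available_course[c]=1'
def countUp (d : PySem.Dict String Int) (k : String) : PySem.Dict String Int :=
  match d.get? k with
  | some v => d.insert k (v + 1)
  | none   => d.insert k 1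

-- the first double loop of A building available_course
def buildA (orders : List String) (course : List Int) : PySem.Dict String Int :=
  orders.foldl (fun d order =>
    course.foldl (fun d i =>
      if ((sortedChars order).length : Int) < i then d
      else (PySem.List.combinations (sortedChars order) i.toNat).foldl
        (fun d cmb => countUp d (String.ofList cmb)) d) d) PySem.Dict.empty

-- body of A's scan 'for ac in available_course' (iterated as items; the value p.2 is
-- exactly the lookup available_course[ac], keys being unique)
def selStep (c : Int) (s : Int × List String) (p : String × Int) : Int × List String :=
  if PySem.Str.len p.1 = c then
    if p.2 = 1 then s
    else if s.1 < p.2 then (p.2, [p.1])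
    else if s.1 = p.2 then (s.1, s.2 ++ [p.1])
    else s
  else s

def solution (orders : List String) (course : List Int) : List String :=
  let available_course := buildA orders course
  let answer := course.foldl
    (fun answer c => answer ++ (available_course.items.foldl (selStep c) (0, [])).2) []
  -- sorted(answer): Python's str order is code-point lexicographic = '<' on toList
  PySem.List.sorted answer (fun x => x.toList) false

-- ===== PORT B =====
-- the per-length Counter of Source B: 'if c <= len(s): counter.update(map(''.join, combinations(s, c)))'
-- over the pre-sorted orders (a Python str iterates as its chars: kept as List Char)
def buildB (sorted_orders : List (List Char)) (c : Int) : PySem.Dict String Int :=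
  sorted_orders.foldl (fun d so =>
    if c ≤ (so.length : Int) then
      (PySem.List.combinations so c.toNat).foldl
        (fun d cmb => d.modify (String.ofList cmb) 0 (· + 1)) d
    else d) PySem.Dict.empty

-- 'if counter: best = max(counter.values()); if best >= 2: [k for k, v in counter.items() if v == best]'
def selBest (counter : PySem.Dict String Int) : List String :=
  match PySem.List.max? counter.values (fun v => v) with
  | none => []
  | some best =>
    if 2 ≤ best then (counter.items.filter (fun p => p.2 == best)).map (·.1) else []

def solution_alt (orders : List String) (course : List Int) : List String :=
  -- sorted_orders = [''.join(sorted(order)) for order in orders]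
  let sorted_orders := orders.map sortedChars
  -- sorted(answer): Python's str order is code-point lexicographic = '<' on toList
  PySem.List.sorted
    (course.foldl (fun answer c => answer ++ selBest (buildB sorted_orders c)) [])
    (fun x => x.toList) false

-- ===== PRECONDITION & SPEC =====
-- A raises ValueError (itertools.combinations with negative r) exactly when orders is
-- nonempty and course contains a negative entry; Pre_ excludes exactly those inputs.
def Pre_solution (orders : List String) (course : List Int) : Prop :=
  orders = [] ∨ ∀ i ∈ course, 0 ≤ i
instance (orders : List String) (course : List Int) : Decidable (Pre_solution orders course) := by
  unfold Pre_solution; infer_instance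
def pvWitness_solution : List String × List Int := (["ab", "bca"], [2])

-- When course contains some length c at least twice and every length-c combination generated
-- from the orders is distinct, A counts each combination once per duplicate occurrence of c, so
-- these single-occurrence combinations pass its count==1 filter and A returns them (repeated per
-- occurrence of c); B's fresh per-length counter sees their true count 1 and returns the
-- intended empty contribution for that length.
def D_solution (orders : List String) (course : List Int) : Prop :=
  ∃ c ∈ course, 2 ≤ course.count c ∧
    orders.flatMap (fun o => PySem.List.combinations (PySem.List.sorted o.toList (fun ch => ch) false) c.toNat) ≠ [] ∧
    (orders.flatMap (fun o => PySem.List.combinations (PySem.List.sorted o.toList (fun ch => ch) false) c.toNat)).Nodup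
instance (orders : List String) (course : List Int) : Decidable (D_solution orders course) := by
  unfold D_solution; infer_instance

def Spec_solution (orders : List String) (course : List Int) (out : List String) : Prop :=
  ¬ D_solution orders course → out = solution_alt orders course
instance (orders : List String) (course : List Int) (out : List String) : Decidable (Spec_solution orders course out) := by
  unfold Spec_solution; infer_instance

def pvDiffWitness_solution : List String × List Int := (["ab"], [2, 2])
def pvDiffWitnessOut_solution : (List String) × (List String) := (["ab", "ab"], [])

-- ===== CLAIM (what is proved, stated in full; the proofs are below) =====
def Claim_unchanged_solution : Prop := ∀ (orders : List String) (course : List Int), Dom_solution orders course → Pre_solution orders course → Spec_solution orders course (solution orders course)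
def Claim_changed_solution : Prop := Dom_solution (pvDiffWitness_solution.1) (pvDiffWitness_solution.2) ∧ Pre_solution (pvDiffWitness_solution.1) (pvDiffWitness_solution.2) ∧ D_solution (pvDiffWitness_solution.1) (pvDiffWitness_solution.2) ∧ solution (pvDiffWitness_solution.1) (pvDiffWitness_solution.2) = pvDiffWitnessOut_solution.1 ∧ solution_alt (pvDiffWitness_solution.1) (pvDiffWitness_solution.2) = pvDiffWitnessOut_solution.2 ∧ pvDiffWitnessOut_solution.1 ≠ pvDiffWitnessOut_solution.2

def Claim_exact_solution : Prop := ∀ (orders : List String) (course : List Int), Dom_solution orders course → Pre_solution orders course → D_solution orders course → solution orders course ≠ solution_alt orders course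

-- ===== LEMMAS AND PROOFS =====

-- the multiset of joined combinations one order / one length contributes
def gen (i : Int) (o : String) : List String :=
  (PySem.List.combinations (sortedChars o) i.toNat).map String.ofList
-- all length-c combinations over all orders, in B's generation order
def genL (orders : List String) (c : Int) : List String := orders.flatMap (gen c)
-- all combinations over all orders and lengths, in A's generation order
def fullA (orders : List String) (course : List Int) : List String :=
  orders.flatMap (fun o => course.flatMap (fun i => gen i o))

lemma countUp_eq_modify (d : PySem.Dict String Int) (k : String) :
    countUp d k = d.modify k 0 (· + 1) := by
  unfold countUp PySem.Dict.modify
  rw [PySem.Dict.getD_eq_get?_getD]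
  cases h : d.get? k <;> simp

lemma buildA_eq_counter (orders : List String) (course : List Int)
    (hpre : ∀ i ∈ course, 0 ≤ i) :
    buildA orders course = PySem.Dict.counter (fullA orders course) := by
  rw [PySem.Dict.counter_eq_foldl, fullA, List.foldl_flatMap]
  unfold buildA
  refine PySem.List.foldl_congr_mem _ _ _ _ ?_
  intro d o _
  rw [List.foldl_flatMap]
  refine PySem.List.foldl_congr_mem _ _ _ _ ?_
  intro d i hi
  have h0 : 0 ≤ i := hpre i hi
  by_cases hg : ((sortedChars o).length : Int) < i
  · have hnil : PySem.List.combinations (sortedChars o) i.toNat = [] :=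
      PySem.List.combinations_eq_nil_of_length_lt _ (by omega)
    simp [hg, gen, hnil]
  · simp only [if_neg hg, gen, List.foldl_map]
    refine PySem.List.foldl_congr_mem _ _ _ _ ?_
    intro d cmb _
    exact countUp_eq_modify d (String.ofList cmb)

lemma buildB_eq_counter (orders : List String) (c : Int) (h0c : 0 ≤ c) :
    buildB (orders.map sortedChars) c = PySem.Dict.counter (genL orders c) := by
  rw [PySem.Dict.counter_eq_foldl, genL, List.foldl_flatMap]
  unfold buildB
  rw [List.foldl_map]
  refine PySem.List.foldl_congr_mem _ _ _ _ ?_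
  intro d o _
  by_cases hg : c ≤ ((sortedChars o).length : Int)
  · rw [if_pos hg, gen, List.foldl_map]
  · have hnil : PySem.List.combinations (sortedChars o) c.toNat = [] :=
      PySem.List.combinations_eq_nil_of_length_lt _ (by omega)
    rw [if_neg hg, gen, hnil]
    rfl

lemma ofList_injective : Function.Injective String.ofList := by
  intro a b h
  have h2 := congrArg String.toList h
  simpa using h2

lemma len_of_mem_gen {i : Int} {o : String} {s : String} (h : s ∈ gen i o) :
    PySem.Str.len s = (i.toNat : Int) := by
  obtain ⟨cmb, hc, rfl⟩ := List.mem_map.1 h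
  have hl := PySem.List.length_of_mem_combinations hc
  simp [PySem.Str.len, hl]

lemma sum_map_ite_count (l : List Int) (c : Int) (v : Nat) :
    (l.map (fun i => if i = c then v else 0)).sum = l.count c * v := by
  induction l with
  | nil => simp
  | cons i l ih =>
    simp only [List.map_cons, List.sum_cons, ih, List.count_cons]
    by_cases h : i = c
    · rw [if_pos h, if_pos (by simp [h])]
      ring
    · rw [if_neg h, if_neg (by simp [h])]
      ring

lemma count_fullA (orders : List String) (course : List Int) (c : Int) (k : String)
    (hpre : ∀ i ∈ course, 0 ≤ i) (hk : PySem.Str.len k = c) :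
    (fullA orders course).count k = course.count c * (genL orders c).count k := by
  unfold fullA genL
  rw [List.count_flatMap, List.count_flatMap]
  simp only [Function.comp_def]
  have hrw : ∀ o ∈ orders,
      (List.count k (course.flatMap (fun i => gen i o)))
        = course.count c * List.count k (gen c o) := by
    intro o _
    rw [List.count_flatMap]
    simp only [Function.comp_def]
    have hmem : ∀ i ∈ course, List.count k (gen i o)
        = if i = c then (gen c o).count k else 0 := by
      intro i hi
      by_cases h : i = c
      · simp [h]
      · have hnm : k ∉ gen i o := by
          intro hm
          have hlen := len_of_mem_gen hm
          have h0i : 0 ≤ i := hpre i hi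
          rw [hk] at hlen
          omega
        simp [h, List.count_eq_zero.2 hnm]
    rw [List.map_congr_left hmem, sum_map_ite_count]
  rw [List.map_congr_left hrw, List.sum_map_mul_left]

-- ---- PySem.Set facts specific to this file's rearrangements ----

lemma set_add_of_mem {s : PySem.Set String} {x : String} (h : x ∈ s) :
    PySem.Set.add s x = s := by
  unfold PySem.Set.add PySem.Set.contains
  simp [h]

lemma set_add_of_not_mem {s : PySem.Set String} {x : String} (h : x ∉ s) :
    PySem.Set.add s x = s ++ [x] := by
  unfold PySem.Set.add PySem.Set.contains
  simp [h]

lemma mem_set_update {s : PySem.Set String} {l : List String} {x : String} :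
    x ∈ PySem.Set.update s l ↔ x ∈ s ∨ x ∈ l := by
  induction l generalizing s with
  | nil => simp [PySem.Set.update]
  | cons y l ih =>
    unfold PySem.Set.update at *
    simp only [List.foldl_cons]
    rw [ih, PySem.Set.mem_add]
    simp only [List.mem_cons]
    tauto

lemma set_update_of_subset {s : PySem.Set String} {l : List String}
    (h : ∀ x ∈ l, x ∈ s) : PySem.Set.update s l = s := by
  induction l generalizing s with
  | nil => rfl
  | cons y l ih =>
    unfold PySem.Set.update at *
    simp only [List.foldl_cons]
    rw [set_add_of_mem (h y (by simp))]
    exact ih (fun x hx => h x (by simp [hx]))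

lemma set_update_append (s : PySem.Set String) (a b : List String) :
    PySem.Set.update s (a ++ b) = PySem.Set.update (PySem.Set.update s a) b := by
  unfold PySem.Set.update
  rw [List.foldl_append]

lemma set_filter_add (s : PySem.Set String) (x : String) (p : String → Bool) :
    (PySem.Set.add s x).filter p
      = if p x then PySem.Set.add (s.filter p) x else s.filter p := by
  by_cases hm : x ∈ s
  · rw [set_add_of_mem hm]
    by_cases hp : p x
    · rw [if_pos hp, set_add_of_mem (List.mem_filter.2 ⟨hm, hp⟩)]
    · rw [if_neg hp]
  · rw [set_add_of_not_mem hm, List.filter_append]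
    by_cases hp : p x
    · rw [if_pos hp,
        set_add_of_not_mem (fun hx => hm (List.mem_filter.1 hx).1)]
      simp [hp]
    · rw [if_neg hp]
      simp [hp]

lemma set_update_filter (l : List String) (p : String → Bool) :
    ∀ s : PySem.Set String,
      (PySem.Set.update s l).filter p = PySem.Set.update (s.filter p) (l.filter p) := by
  induction l with
  | nil => intro s; rfl
  | cons x l ih =>
    intro s
    unfold PySem.Set.update at *
    simp only [List.foldl_cons, List.filter_cons]
    by_cases hp : p x
    · simp only [if_pos hp, List.foldl_cons]
      rw [ih, set_filter_add, if_pos hp]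
    · simp only [if_neg hp]
      rw [ih, set_filter_add, if_neg hp]

lemma set_ofList_filter (l : List String) (p : String → Bool) :
    (PySem.Set.ofList l).filter p = PySem.Set.ofList (l.filter p) := by
  rw [PySem.Set.ofList_eq_foldl, PySem.Set.ofList_eq_foldl]
  have h := set_update_filter l p []
  unfold PySem.Set.update at h
  simpa using h

lemma set_ofList_eq_nil {l : List String} (h : PySem.Set.ofList l = []) : l = [] := by
  cases l with
  | nil => rfl
  | cons x l =>
    exfalso
    have hx : x ∈ PySem.Set.ofList (x :: l) := (PySem.Set.mem_ofList _ _).2 (by simp)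
    rw [h] at hx
    simp at hx

-- per order, the repeated length-c blocks of A's generation sequence collapse to one block
lemma update_blk (o : String) (c : Int) (course : List Int) :
    ∀ s : PySem.Set String, c ∈ course →
      PySem.Set.update s (course.flatMap (fun i => if i = c then gen c o else []))
        = PySem.Set.update s (gen c o) := by
  induction course with
  | nil => intro s h; simp at h
  | cons i rest ih =>
    intro s hc
    rw [List.flatMap_cons, set_update_append]
    by_cases h : i = c
    · rw [if_pos h]
      apply set_update_of_subset
      intro x hx
      obtain ⟨j, _, hj⟩ := List.mem_flatMap.1 hx
      refine mem_set_update.2 (Or.inr ?_)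
      by_cases hj' : j = c
      · simpa [hj'] using hj
      · simp [hj'] at hj
    · rw [if_neg h]
      have hc' : c ∈ rest := by
        rcases List.mem_cons.1 hc with h' | h'
        · exact absurd h'.symm h
        · exact h'
      exact ih s hc'

lemma update_flat_blk (c : Int) (course : List Int) (hc : c ∈ course) :
    ∀ (orders : List String) (s : PySem.Set String),
      PySem.Set.update s (orders.flatMap (fun o =>
          course.flatMap (fun i => if i = c then gen c o else [])))
        = PySem.Set.update s (orders.flatMap (gen c)) := by
  intro orders
  induction orders with
  | nil => intro s; rfl
  | cons o rest ih =>
    intro s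
    rw [List.flatMap_cons, List.flatMap_cons, set_update_append, set_update_append,
      update_blk o c course s hc]
    exact ih _

lemma filter_fullA (orders : List String) (course : List Int) (c : Int)
    (hpre : ∀ i ∈ course, 0 ≤ i) :
    (fullA orders course).filter (fun s => decide (PySem.Str.len s = c))
      = orders.flatMap (fun o => course.flatMap (fun i => if i = c then gen c o else [])) := by
  unfold fullA
  rw [List.filter_flatMap]
  refine List.flatMap_congr ?_
  intro o _
  rw [List.filter_flatMap]
  refine List.flatMap_congr ?_
  intro i hi
  have h0i : 0 ≤ i := hpre i hi
  by_cases h : i = c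
  · rw [if_pos h, ← h]
    rw [List.filter_eq_self]
    intro s hs
    have hlen := len_of_mem_gen hs
    simp only [decide_eq_true_eq]
    rw [hlen]
    omega
  · rw [if_neg h, List.filter_eq_nil_iff]
    intro s hs
    have hlen := len_of_mem_gen hs
    simp only [decide_eq_true_eq, hlen]
    omega

lemma setA_eq (orders : List String) (course : List Int) (c : Int)
    (hpre : ∀ i ∈ course, 0 ≤ i) (hc : c ∈ course) :
    (PySem.Set.ofList (fullA orders course)).filter (fun s => decide (PySem.Str.len s = c))
      = PySem.Set.ofList (genL orders c) := by
  rw [set_ofList_filter, filter_fullA orders course c hpre]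
  rw [PySem.Set.ofList_eq_foldl, PySem.Set.ofList_eq_foldl]
  unfold genL
  exact update_flat_blk c course hc orders []

lemma itemsA_eq (orders : List String) (course : List Int) (c : Int)
    (hpre : ∀ i ∈ course, 0 ≤ i) (h0c : 0 ≤ c) (hc : c ∈ course) :
    (buildA orders course).items.filter (fun p => decide (PySem.Str.len p.1 = c))
      = (PySem.Set.ofList (genL orders c)).map
          (fun k => (k, ((course.count c * (genL orders c).count k : Nat) : Int))) := by
  rw [buildA_eq_counter orders course hpre, PySem.Dict.items_counter, List.filter_map]
  have hpred : ((fun p : String × Int => decide (PySem.Str.len p.1 = c)) ∘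
      (fun k => (k, ((List.count k (fullA orders course) : Nat) : Int))))
      = fun k => decide (PySem.Str.len k = c) := rfl
  rw [hpred, setA_eq orders course c hpre hc]
  refine List.map_congr_left ?_
  intro k hk
  have hkg : k ∈ genL orders c := (PySem.Set.mem_ofList _ _).1 hk
  have hlen : PySem.Str.len k = c := by
    unfold genL at hkg
    obtain ⟨o, _, hko⟩ := List.mem_flatMap.1 hkg
    rw [len_of_mem_gen hko, Int.toNat_of_nonneg h0c]
  rw [count_fullA orders course c k hpre hlen]

-- ---- the max-selection loop of A, in closed form ----

def innerStep (s : Int × List String) (p : String × Int) : Int × List String :=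
  if p.2 = 1 then s
  else if s.1 < p.2 then (p.2, [p.1])
  else if s.1 = p.2 then (s.1, s.2 ++ [p.1])
  else s

lemma selStep_eq (c : Int) :
    selStep c = fun s p => if PySem.Str.len p.1 = c then innerStep s p else s := rfl

def mstep (a : Int) (p : String × Int) : Int := if 2 ≤ p.2 then max a p.2 else a

lemma le_mstep_foldl (l : List (String × Int)) : ∀ a : Int, a ≤ l.foldl mstep a := by
  induction l with
  | nil => intro a; simp
  | cons p l ih =>
    intro a
    refine le_trans ?_ (ih (mstep a p))
    unfold mstep
    split <;> simp

lemma mstep_foldl_le (l : List (String × Int)) (b : Int)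
    (hb : ∀ p ∈ l, p.2 ≤ b) : ∀ a : Int, a ≤ b → l.foldl mstep a ≤ b := by
  induction l with
  | nil => intro a ha; simpa using ha
  | cons p l ih =>
    intro a ha
    simp only [List.foldl_cons]
    refine ih (fun q hq => hb q (by simp [hq])) _ ?_
    unfold mstep
    split
    · exact max_le ha (hb p (by simp))
    · exact ha

lemma mstep_foldl_ge (l : List (String × Int)) {p : String × Int}
    (hp : p ∈ l) (h2 : 2 ≤ p.2) : ∀ a : Int, p.2 ≤ l.foldl mstep a := by
  induction l with
  | nil => simp at hp
  | cons q l ih =>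
    intro a
    rcases List.mem_cons.1 hp with h | h
    · subst h
      simp only [List.foldl_cons]
      refine le_trans ?_ (le_mstep_foldl l (mstep a p))
      unfold mstep
      rw [if_pos h2]
      exact le_max_right _ _
    · exact ih h _

def mval (l : List (String × Int)) : Int := l.foldl mstep 0

lemma loop_char (l : List (String × Int)) (h1 : ∀ p ∈ l, 1 ≤ p.2) :
    l.foldl innerStep (0, [])
      = (mval l, (l.filter (fun p => decide (2 ≤ p.2 ∧ p.2 = mval l))).map (·.1)) := by
  induction l using List.reverseRecOn with
  | nil => simp [mval]
  | append_singleton l p ih =>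
    have h1l : ∀ q ∈ l, 1 ≤ q.2 := fun q hq => h1 q (by simp [hq])
    have h1p : 1 ≤ p.2 := h1 p (by simp)
    have hm : mval (l ++ [p]) = if 2 ≤ p.2 then max (mval l) p.2 else mval l := by
      unfold mval
      rw [List.foldl_append]
      rfl
    rw [List.foldl_append, ih h1l]
    simp only [List.foldl_cons, List.foldl_nil]
    by_cases hp1 : p.2 = 1
    · have hn2 : ¬ (2 ≤ p.2) := by omega
      have hm' : mval (l ++ [p]) = mval l := by rw [hm, if_neg hn2]
      rw [hm', List.filter_append]
      have hone : List.filter (fun q => decide (2 ≤ q.2 ∧ q.2 = mval l)) [p] = [] := by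
        simp only [List.filter_cons, List.filter_nil]
        rw [if_neg (by simp; omega)]
      rw [hone, List.append_nil]
      show innerStep _ p = _
      unfold innerStep
      rw [if_pos hp1]
    · have h2 : 2 ≤ p.2 := by omega
      show innerStep _ p = _
      unfold innerStep
      rw [if_neg hp1]
      dsimp only
      by_cases hlt : mval l < p.2
      · rw [if_pos hlt]
        have hm' : mval (l ++ [p]) = p.2 := by
          rw [hm, if_pos h2]; omega
        rw [hm', List.filter_append]
        have hfl : l.filter (fun q => decide (2 ≤ q.2 ∧ q.2 = p.2)) = [] := by
          rw [List.filter_eq_nil_iff]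
          intro q hq
          simp only [decide_eq_true_eq, not_and]
          intro h2q
          have hle := mstep_foldl_ge l hq h2q 0
          have : q.2 ≤ mval l := hle
          omega
        rw [hfl]
        have hps : List.filter (fun q => decide (2 ≤ q.2 ∧ q.2 = p.2)) [p] = [p] := by
          simp [h2]
        rw [hps]
        simp
      · rw [if_neg hlt]
        by_cases heq : mval l = p.2
        · rw [if_pos heq]
          have hm' : mval (l ++ [p]) = mval l := by
            rw [hm, if_pos h2]; omega
          rw [hm', List.filter_append]
          have hps : List.filter (fun q => decide (2 ≤ q.2 ∧ q.2 = mval l)) [p] = [p] := by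
            simp only [List.filter_cons, List.filter_nil]
            rw [if_pos (by simp only [decide_eq_true_eq]; exact ⟨h2, heq.symm⟩)]
          rw [hps]
          simp
        · rw [if_neg heq]
          have hm' : mval (l ++ [p]) = mval l := by
            rw [hm, if_pos h2]; omega
          rw [hm', List.filter_append]
          have hps : List.filter (fun q => decide (2 ≤ q.2 ∧ q.2 = mval l)) [p] = [] := by
            simp only [List.filter_cons, List.filter_nil]
            rw [if_neg (by simp; omega)]
          rw [hps, List.append_nil]

-- ---- bridging D_ to genL ----

lemma genL_eq_map (orders : List String) (c : Int) :
    genL orders c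
      = (orders.flatMap (fun o =>
          PySem.List.combinations (PySem.List.sorted o.toList (fun ch => ch) false) c.toNat)).map
            String.ofList := by
  unfold genL gen sortedChars
  rw [List.map_flatMap]

-- ---- the per-length selections agree outside D_ ----

-- A's per-length fold, in closed form (to be compared with selBest)
lemma selA_form (orders : List String) (course : List Int) (c : Int)
    (hpre : ∀ i ∈ course, 0 ≤ i) (h0c : 0 ≤ c) (hc : c ∈ course) :
    ((buildA orders course).items.foldl (selStep c) (0, [])).2
      = (((PySem.Set.ofList (genL orders c)).map
            (fun k => (k, ((course.count c * (genL orders c).count k : Nat) : Int)))).filter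
          (fun p => decide (2 ≤ p.2 ∧ p.2
            = mval ((PySem.Set.ofList (genL orders c)).map
                (fun k => (k, ((course.count c * (genL orders c).count k : Nat) : Int))))))).map
          (·.1) := by
  rw [selStep_eq, PySem.List.foldl_ite_eq_foldl_filter
    (p := fun p : String × Int => PySem.Str.len p.1 = c) innerStep]
  rw [itemsA_eq orders course c hpre h0c hc]
  have h1 : ∀ p ∈ (PySem.Set.ofList (genL orders c)).map
      (fun k => (k, ((course.count c * (genL orders c).count k : Nat) : Int))), 1 ≤ p.2 := by
    intro p hp
    obtain ⟨k, hk, rfl⟩ := List.mem_map.1 hp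
    show (1 : Int) ≤ ((course.count c * (genL orders c).count k : Nat) : Int)
    have hk1 : 1 ≤ (genL orders c).count k :=
      List.count_pos_iff.2 ((PySem.Set.mem_ofList _ _).1 hk)
    have hm1 : 1 ≤ course.count c := List.count_pos_iff.2 hc
    have h1' : 1 ≤ course.count c * (genL orders c).count k := Nat.mul_pos hm1 hk1
    exact_mod_cast h1'
  rw [loop_char _ h1]

lemma sel_eq (orders : List String) (course : List Int) (c : Int)
    (hpre : ∀ i ∈ course, 0 ≤ i) (hc : c ∈ course)
    (hnd : ¬ D_solution orders course) :
    ((buildA orders course).items.foldl (selStep c) (0, [])).2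
      = selBest (buildB (orders.map sortedChars) c) := by
  have h0c : 0 ≤ c := hpre c hc
  rw [selA_form orders course c hpre h0c hc]
  set S := PySem.Set.ofList (genL orders c) with hS
  set m : Nat := course.count c with hm
  set cnt : String → Nat := fun k => (genL orders c).count k with hcnt
  have hm1 : 1 ≤ m := List.count_pos_iff.2 hc
  have hcnt1 : ∀ k ∈ S, 1 ≤ cnt k := by
    intro k hk
    exact List.count_pos_iff.2 ((PySem.Set.mem_ofList _ _).1 hk)
  have hitems : (PySem.Dict.counter (genL orders c)).items
      = S.map (fun k => (k, (cnt k : Int))) := PySem.Dict.items_counter _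
  have hvals : (PySem.Dict.counter (genL orders c)).values
      = S.map (fun k => (cnt k : Int)) := by
    unfold PySem.Dict.values
    rw [hitems, List.map_map]
    rfl
  rcases hSe : S with _ | ⟨k1, S'⟩
  · -- no combinations at all: both sides are empty
    have hg : genL orders c = [] := set_ofList_eq_nil (by rw [← hS]; exact hSe)
    have hmx0 : PySem.List.max? ((buildB (orders.map sortedChars) c).values) (fun v => v) = none := by
      rw [buildB_eq_counter orders c h0c, hg]
      rfl
    simp [selBest, hmx0]
  · rw [← hSe]
    have hSne : S ≠ [] := by rw [hSe]; simp
    have hvne : S.map (fun k => (cnt k : Int)) ≠ [] := by simpa using hSne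
    rcases hmx : PySem.List.max? (S.map (fun k => (cnt k : Int))) (fun v => v) with _ | best
    · exact absurd ((PySem.List.max?_eq_none_iff _ _).1 hmx) hvne
    · obtain ⟨k0, hk0, hbest⟩ := List.mem_map.1 (PySem.List.max?_mem hmx)
      have hmaxv : ∀ k ∈ S, (cnt k : Int) ≤ best := by
        intro k hk
        have := PySem.List.max?_isMax hmx ((cnt k : Int)) (List.mem_map.2 ⟨k, hk, rfl⟩)
        simpa using this
      have hb1 : 1 ≤ best := by
        have := hcnt1 k0 hk0
        omega
      have hselB : selBest (buildB (orders.map sortedChars) c)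
          = if 2 ≤ best
            then ((S.map (fun k => (k, (cnt k : Int)))).filter (fun p => p.2 == best)).map (·.1)
            else [] := by
        unfold selBest
        rw [buildB_eq_counter orders c h0c, hvals, hmx, hitems]
      rw [hselB]
      by_cases h2b : 2 ≤ best
      · rw [if_pos h2b]
        -- A's threshold value for this length is m * best
        have hmv : mval (S.map (fun k => (k, ((m * cnt k : Nat) : Int)))) = (m : Int) * best := by
          have hge : ((m * cnt k0 : Nat) : Int)
              ≤ mval (S.map (fun k => (k, ((m * cnt k : Nat) : Int)))) := by
            refine mstep_foldl_ge _ (List.mem_map.2 ⟨k0, hk0, rfl⟩) ?_ 0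
            show (2 : Int) ≤ ((m * cnt k0 : Nat) : Int)
            push_cast
            nlinarith [hcnt1 k0 hk0, hm1, hbest, h2b]
          have hle : mval (S.map (fun k => (k, ((m * cnt k : Nat) : Int)))) ≤ (m : Int) * best := by
            refine mstep_foldl_le _ _ ?_ 0 (by positivity)
            intro p hp
            obtain ⟨k, hk, rfl⟩ := List.mem_map.1 hp
            show ((m * cnt k : Nat) : Int) ≤ (m : Int) * best
            push_cast
            nlinarith [hmaxv k hk, hcnt1 k hk, hm1]
          have heq0 : ((m * cnt k0 : Nat) : Int) = (m : Int) * best := by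
            push_cast
            rw [hbest]
          omega
        rw [hmv, List.filter_map, List.filter_map, List.map_map, List.map_map]
        show List.map (fun k => k) _ = List.map (fun k => k) _
        congr 1
        refine List.filter_congr ?_
        intro k hk
        simp only [Function.comp_def]
        have hiff : (2 ≤ ((m * cnt k : Nat) : Int) ∧ ((m * cnt k : Nat) : Int) = (m : Int) * best)
            ↔ ((cnt k : Int) = best) := by
          constructor
          · rintro ⟨_, he⟩
            have hmb : (m : Int) * (cnt k : Int) = (m : Int) * best := by
              push_cast at he ⊢
              linarith
            have hmne : (m : Int) ≠ 0 := by positivity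
            exact mul_left_cancel₀ hmne hmb
          · intro he
            constructor
            · push_cast
              rw [he]
              nlinarith [hm1, h2b]
            · push_cast
              rw [he]
        have hbeq : ((cnt k : Int) == best) = decide ((cnt k : Int) = best) := by
          by_cases hd : (cnt k : Int) = best <;> simp [hd]
        rw [hbeq]
        exact decide_eq_decide.mpr hiff
      · rw [if_neg h2b]
        -- every combination is unique: outside D_ this forces m = 1, and then nothing passes
        have hbeq : best = 1 := by omega
        have hcntle : ∀ k, (genL orders c).count k ≤ 1 := by
          intro k
          by_cases hk : k ∈ genL orders c
          · have := hmaxv k ((PySem.Set.mem_ofList _ _).2 hk)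
            rw [hbeq] at this
            exact_mod_cast this
          · simp [List.count_eq_zero.2 hk]
        have hnodup : (genL orders c).Nodup := List.nodup_iff_count_le_one.2 hcntle
        have hne : genL orders c ≠ [] := by
          intro h
          exact hSne (by rw [hS, h]; rfl)
        have hm1' : m = 1 := by
          by_contra hm2
          apply hnd
          refine ⟨c, hc, by omega, ?_, ?_⟩
          · intro h
            exact hne (by rw [genL_eq_map, h]; rfl)
          · have hnd2 := hnodup
            rw [genL_eq_map] at hnd2
            exact hnd2.of_map
        have hfe : (S.map (fun k => (k, ((m * cnt k : Nat) : Int)))).filter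
            (fun p => decide (2 ≤ p.2 ∧ p.2 = mval (S.map (fun k => (k, ((m * cnt k : Nat) : Int)))))) = [] := by
          rw [List.filter_eq_nil_iff]
          intro p hp
          obtain ⟨k, hk, rfl⟩ := List.mem_map.1 hp
          simp only [decide_eq_true_eq, not_and]
          intro h2
          exfalso
          have hck : cnt k ≤ 1 := hcntle k
          have hle1 : ((m * cnt k : Nat) : Int) ≤ 1 := by
            have hn : m * cnt k ≤ 1 := by rw [hm1']; omega
            exact_mod_cast hn
          have h2' : (2 : Int) ≤ ((m * cnt k : Nat) : Int) := h2
          omega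
        rw [hfe, List.map_nil]

lemma solA_flat (orders : List String) (course : List Int) :
    solution orders course
      = PySem.List.sorted (course.flatMap (fun c =>
          ((buildA orders course).items.foldl (selStep c) (0, [])).2))
        (fun x => x.toList) false := by
  have hA : solution orders course
      = PySem.List.sorted (course.foldl (fun answer c =>
          answer ++ ((buildA orders course).items.foldl (selStep c) (0, [])).2) [])
        (fun x => x.toList) false := rfl
  rw [hA, PySem.List.foldl_append_eq_flatMap
    (g := fun c => ((buildA orders course).items.foldl (selStep c) (0, [])).2),
    List.nil_append]

lemma solB_flat (orders : List String) (course : List Int) :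
    solution_alt orders course
      = PySem.List.sorted (course.flatMap (fun c =>
          selBest (buildB (orders.map sortedChars) c)))
        (fun x => x.toList) false := by
  have hB : solution_alt orders course
      = PySem.List.sorted (course.foldl (fun answer c =>
          answer ++ selBest (buildB (orders.map sortedChars) c)) [])
        (fun x => x.toList) false := rfl
  rw [hB, PySem.List.foldl_append_eq_flatMap
    (g := fun c => selBest (buildB (orders.map sortedChars) c))]
  rw [List.nil_append]

lemma empty_case (course : List Int) :
    solution [] course = solution_alt [] course := by
  rw [solA_flat, solB_flat]
  congr 1


-- members of Source B's per-length selection carry a maximal count ≥ 2 at their own length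
lemma mem_selBest {d : PySem.Dict String Int} {k : String} (h : k ∈ selBest d) :
    ∃ best, PySem.List.max? d.values (fun v => v) = some best ∧ 2 ≤ best ∧
      ∃ v, (k, v) ∈ d.items ∧ v = best := by
  unfold selBest at h
  rcases hmx : PySem.List.max? d.values (fun v => v) with _ | best
  · rw [hmx] at h
    simp at h
  · rw [hmx] at h
    have h' : k ∈ (if 2 ≤ best
        then (d.items.filter (fun p => p.2 == best)).map (·.1) else ([] : List String)) := h
    by_cases h2 : 2 ≤ best
    · rw [if_pos h2] at h'
      obtain ⟨p, hp, rfl⟩ := List.mem_map.1 h'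
      have hf := List.mem_filter.1 hp
      refine ⟨best, rfl, h2, p.2, hf.1, by simpa using hf.2⟩
    · rw [if_neg h2] at h'
      simp at h'

-- ===== VERDICT (by name: the statement is the Claim_ definition above) =====
theorem solution_spec : Claim_unchanged_solution := by
  intro orders course _ hpre
  unfold Spec_solution
  intro hnd
  rcases hpre with h | hpre
  · subst h; exact empty_case course
  · rw [solA_flat, solB_flat]
    congr 1
    refine List.flatMap_congr ?_
    intro c hc
    exact sel_eq orders course c hpre hc hnd

theorem solution_changed : Claim_changed_solution := by
  unfold Claim_changed_solution
  decide

theorem solution_tight : Claim_exact_solution := by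
  intro orders course _ hpre hd
  obtain ⟨c, hc, hm2, hne0, hnd0⟩ := hd
  have hgen_ne : genL orders c ≠ [] := by
    rw [genL_eq_map]
    intro h
    exact hne0 (List.map_eq_nil_iff.1 h)
  have hgen_nd : (genL orders c).Nodup := by
    rw [genL_eq_map]
    exact List.Nodup.map ofList_injective hnd0
  have hpre' : ∀ i ∈ course, 0 ≤ i := by
    rcases hpre with h | h
    · exfalso
      apply hgen_ne
      rw [h]
      rfl
    · exact h
  have h0c : 0 ≤ c := hpre' c hc
  obtain ⟨k0, hk0⟩ : ∃ k, k ∈ genL orders c := by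
    cases hgl : genL orders c with
    | nil => exact absurd hgl hgen_ne
    | cons a t => exact ⟨a, by simp⟩
  have hk0len : PySem.Str.len k0 = c := by
    obtain ⟨o, _, hko⟩ := List.mem_flatMap.1 hk0
    rw [len_of_mem_gen hko, Int.toNat_of_nonneg h0c]
  have hcnt1 : ∀ k ∈ genL orders c, (genL orders c).count k = 1 :=
    fun k hk => List.count_eq_one_of_mem hgen_nd hk
  have hm2' : (2 : Int) ≤ (course.count c : Int) := by exact_mod_cast hm2
  -- k0 appears in A's answer …
  have hmA : k0 ∈ solution orders course := by
    rw [solA_flat, (PySem.List.sorted_perm _ _ _).mem_iff]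
    refine List.mem_flatMap.2 ⟨c, hc, ?_⟩
    rw [selA_form orders course c hpre' h0c hc]
    have hval : ∀ k ∈ genL orders c,
        ((course.count c * (genL orders c).count k : Nat) : Int) = (course.count c : Int) := by
      intro k hk
      rw [hcnt1 k hk]
      push_cast
      ring
    have hmval : mval ((PySem.Set.ofList (genL orders c)).map
        (fun k => (k, ((course.count c * (genL orders c).count k : Nat) : Int))))
        = (course.count c : Int) := by
      apply le_antisymm
      · refine mstep_foldl_le _ _ ?_ 0 (by positivity)
        intro p hp
        obtain ⟨k, hk, rfl⟩ := List.mem_map.1 hp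
        show ((course.count c * (genL orders c).count k : Nat) : Int) ≤ (course.count c : Int)
        rw [hval k ((PySem.Set.mem_ofList _ _).1 hk)]
      · have hge := mstep_foldl_ge
          ((PySem.Set.ofList (genL orders c)).map
            (fun k => (k, ((course.count c * (genL orders c).count k : Nat) : Int))))
          (p := (k0, ((course.count c * (genL orders c).count k0 : Nat) : Int)))
          (List.mem_map.2 ⟨k0, (PySem.Set.mem_ofList _ _).2 hk0, rfl⟩)
          (by
            show (2 : Int) ≤ ((course.count c * (genL orders c).count k0 : Nat) : Int)
            rw [hval k0 hk0]
            exact hm2') 0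
        have hv := hval k0 hk0
        unfold mval
        dsimp only at hge
        omega
    refine List.mem_map.2
      ⟨(k0, ((course.count c * (genL orders c).count k0 : Nat) : Int)), ?_, rfl⟩
    refine List.mem_filter.2
      ⟨List.mem_map.2 ⟨k0, (PySem.Set.mem_ofList _ _).2 hk0, rfl⟩, ?_⟩
    simp only [decide_eq_true_eq]
    rw [hmval]
    constructor
    · show (2 : Int) ≤ ((course.count c * (genL orders c).count k0 : Nat) : Int)
      rw [hval k0 hk0]
      exact hm2'
    · show ((course.count c * (genL orders c).count k0 : Nat) : Int) = (course.count c : Int)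
      exact hval k0 hk0
  -- … but not in B's
  have hmB : k0 ∉ solution_alt orders course := by
    rw [solB_flat, (PySem.List.sorted_perm _ _ _).mem_iff]
    intro hmem
    obtain ⟨c', hc', hsel⟩ := List.mem_flatMap.1 hmem
    have h0c' : 0 ≤ c' := hpre' c' hc'
    rw [buildB_eq_counter orders c' h0c'] at hsel
    obtain ⟨best, _, h2b, v, hv, rfl⟩ := mem_selBest hsel
    rw [PySem.Dict.items_counter] at hv
    obtain ⟨k, hkS, hkeq⟩ := List.mem_map.1 hv
    have hkk : k = k0 := congrArg Prod.fst hkeq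
    have hcv : ((List.count k (genL orders c') : Nat) : Int) = v := congrArg Prod.snd hkeq
    have hkg : k0 ∈ genL orders c' := hkk ▸ (PySem.Set.mem_ofList _ _).1 hkS
    by_cases hcc : c' = c
    · subst hcc
      have hone := hcnt1 k0 hkg
      rw [hkk, hone] at hcv
      omega
    · have : PySem.Str.len k0 = c' := by
        obtain ⟨o, _, hko⟩ := List.mem_flatMap.1 hkg
        rw [len_of_mem_gen hko, Int.toNat_of_nonneg h0c']
      rw [hk0len] at this
      exact hcc this.symm
  intro heq
  rw [heq] at hmA
  exact hmB hmA
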